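-- pv_equiv track=rewrite | github.com/pzzmyc-ops/hhynodes | smart_comic_merge_node.py | merge_similar_colors
-- ===== SOURCE A (Python) =====
-- def merge_similar_colors(pixels, similarity_threshold=10):
--     """
--     合并相似颜色，避免JPEG压缩导致的颜色碎片化
--
--     参数:
--         pixels: 像素列表 [(R,G,B), ...]
--         similarity_threshold: 相似度阈值，RGB差值小于此值的认为是同一种颜色
--
--     返回:
--         合并后的唯一颜色数量
--     """
--     if not pixels:
--         return 0
--
--     # 将相似颜色映射到代表色
--     color_groups = {}
--
--     for pixel in pixels:
--         # 量化颜色：将RGB值按阈值分组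
--         quantized = tuple((c // similarity_threshold) * similarity_threshold for c in pixel)
--         color_groups[quantized] = color_groups.get(quantized, 0) + 1
--
--     return len(color_groups)
-- ===== SOURCE B (Python) =====
-- def merge_similar_colors(pixels, similarity_threshold=10):
--     if not pixels:
--         return 0
--     quantized = sorted(
--         tuple((c // similarity_threshold) * similarity_threshold for c in pixel)
--         for pixel in pixels
--     )
--     count = 1
--     prev = quantized[0]
--     for q in quantized[1:]:
--         if q != prev:
--             count += 1
--             prev = q
--     return count
-- ===== Notes on version B (the rewrite author's own statement) =====
-- stated objective: alternative
-- what changed: Replaces the hash-dict grouping (count per quantized color, return len) by a sort-then-scan: quantize every pixel, sort the quantized tuples, and count block boundaries in one linear pass over the sorted list.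
import Mathlib
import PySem

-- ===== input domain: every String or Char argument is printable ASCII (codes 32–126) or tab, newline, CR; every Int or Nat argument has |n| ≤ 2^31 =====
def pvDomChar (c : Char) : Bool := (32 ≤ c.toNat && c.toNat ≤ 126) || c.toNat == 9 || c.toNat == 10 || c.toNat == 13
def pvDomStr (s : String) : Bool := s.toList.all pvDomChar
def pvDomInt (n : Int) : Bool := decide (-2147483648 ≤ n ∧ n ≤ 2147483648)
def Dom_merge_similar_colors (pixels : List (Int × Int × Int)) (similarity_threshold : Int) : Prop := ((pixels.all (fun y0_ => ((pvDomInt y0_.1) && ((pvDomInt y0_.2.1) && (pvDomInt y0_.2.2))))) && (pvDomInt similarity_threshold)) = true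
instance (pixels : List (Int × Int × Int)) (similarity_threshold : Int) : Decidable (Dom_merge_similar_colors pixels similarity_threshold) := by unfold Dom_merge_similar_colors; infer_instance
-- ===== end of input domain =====

-- B reorganizes A's hash-dict grouping into sort-then-scan over the quantized tuples; equivalence of the two counts is proved below.

-- ===== PORT A =====
-- quantized = tuple((c // similarity_threshold) * similarity_threshold for c in pixel)
def pvQuant (t : Int) (p : Int × Int × Int) : Int × Int × Int :=
  (PySem.Int.floordiv p.1 t * t, PySem.Int.floordiv p.2.1 t * t, PySem.Int.floordiv p.2.2 t * t)

def merge_similar_colors (pixels : List (Int × Int × Int)) (similarity_threshold : Int) : Int :=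
  if pixels = [] then 0
  else
    -- color_groups[quantized] = color_groups.get(quantized, 0) + 1
    let color_groups : PySem.Dict (Int × Int × Int) Int :=
      pixels.foldl (fun d pixel =>
        d.insert (pvQuant similarity_threshold pixel) (d.getD (pvQuant similarity_threshold pixel) 0 + 1))
        PySem.Dict.empty
    (color_groups.size : Int)

-- ===== PORT B =====
-- lexicographic sort key on quantized triples (Python's tuple order; injective and
-- order-isomorphic on the |component| < 2^39 range that Dom guarantees)
def pvPackKey (q : Int × Int × Int) : Int := (q.1 * 1099511627776 + q.2.1) * 1099511627776 + q.2.2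

def merge_similar_colors_alt (pixels : List (Int × Int × Int)) (similarity_threshold : Int) : Int :=
  if pixels = [] then 0
  else
    let quantized := PySem.List.sorted (pixels.map (pvQuant similarity_threshold)) pvPackKey
    match quantized with
    | [] => 0  -- unreachable: pixels ≠ []
    | q0 :: rest =>
        (rest.foldl (fun s q => if q = s.2 then s else (s.1 + 1, q)) ((1 : Int), q0)).1

-- ===== PRECONDITION & SPEC =====
-- Pre_ excludes only similarity_threshold = 0 with nonempty pixels, where A raises ZeroDivisionError (B raises there too).
def Pre_merge_similar_colors (pixels : List (Int × Int × Int)) (similarity_threshold : Int) : Prop :=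
  similarity_threshold ≠ 0 ∨ pixels = []
instance (pixels : List (Int × Int × Int)) (similarity_threshold : Int) : Decidable (Pre_merge_similar_colors pixels similarity_threshold) := by unfold Pre_merge_similar_colors; infer_instance

def pvWitness_merge_similar_colors : (List (Int × Int × Int)) × Int := ([(12, 5, 255), (13, 4, 250), (100, 5, 255)], 10)

def Spec_merge_similar_colors (pixels : List (Int × Int × Int)) (similarity_threshold : Int) (out : Int) : Prop := out = merge_similar_colors_alt pixels similarity_threshold
instance (pixels : List (Int × Int × Int)) (similarity_threshold : Int) (out : Int) : Decidable (Spec_merge_similar_colors pixels similarity_threshold out) := by unfold Spec_merge_similar_colors; infer_instance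

-- ===== CLAIM (what is proved, stated in full; the proofs are below) =====
def Claim_equal_merge_similar_colors : Prop := ∀ (pixels : List (Int × Int × Int)) (similarity_threshold : Int), Dom_merge_similar_colors pixels similarity_threshold → Pre_merge_similar_colors pixels similarity_threshold → Spec_merge_similar_colors pixels similarity_threshold (merge_similar_colors pixels similarity_threshold)

-- ===== LEMMAS AND PROOFS =====

-- components of a quantized in-Dom pixel are bounded (quantization subtracts a remainder smaller than |t|)
def pvBnd (q : Int × Int × Int) : Prop := |q.1| ≤ 2^33 ∧ |q.2.1| ≤ 2^33 ∧ |q.2.2| ≤ 2^33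

theorem pvQuant_bnd (t : Int) (ht : t ≠ 0) (p : Int × Int × Int)
    (h1 : |p.1| ≤ 2^31) (h2 : |p.2.1| ≤ 2^31) (h3 : |p.2.2| ≤ 2^31) (h4 : |t| ≤ 2^31) :
    pvBnd (pvQuant t p) := by
  have key : ∀ c : Int, |c| ≤ 2^31 → |PySem.Int.floordiv c t * t| ≤ 2^33 := by
    intro c hc
    have hfm := PySem.Int.floordiv_mul_add_mod c t
    have hm : -(2^31) ≤ PySem.Int.mod c t ∧ PySem.Int.mod c t ≤ 2^31 := by
      rcases lt_or_gt_of_ne ht with h | h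
      · have := PySem.Int.mod_neg_bounds c h
        rw [abs_le] at h4; omega
      · have h5 := PySem.Int.mod_nonneg c h
        have h6 := PySem.Int.mod_lt c h
        rw [abs_le] at h4; omega
    rw [abs_le] at hc ⊢
    constructor <;> linarith
  exact ⟨key _ h1, key _ h2, key _ h3⟩

theorem pvPackKey_inj (a b : Int × Int × Int) (ha : pvBnd a) (hb : pvBnd b)
    (h : pvPackKey a = pvPackKey b) : a = b := by
  obtain ⟨a1, a2, a3⟩ := a
  obtain ⟨b1, b2, b3⟩ := b
  simp only [pvPackKey, pvBnd, abs_le] at *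
  ring_nf at h
  simp only [Prod.mk.injEq]
  omega

-- the scan over a key-sorted list with all-distinct keys counts the distinct elements other than the head
theorem pvScan_aux (k : (Int × Int × Int) → Int) :
    ∀ (l : List (Int × Int × Int)) (p : Int × Int × Int) (c : Int),
      List.Pairwise (fun a b => k a ≤ k b) (p :: l) →
      (∀ a ∈ p :: l, ∀ b ∈ p :: l, k a = k b → a = b) →
      (l.foldl (fun s q => if q = s.2 then s else (s.1 + 1, q)) (c, p)).1
        = c + ((l.filter (· ≠ p)).toFinset.card : Int) := by
  intro l
  induction l with
  | nil => intro p c _ _; simp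
  | cons x xs ih =>
    intro p c hpair hinj
    have hpair' : List.Pairwise (fun a b => k a ≤ k b) (x :: xs) := hpair.sublist (by simp)
    by_cases hx : x = p
    · subst hx
      have hIH := ih x c hpair' (fun a ha b hb => hinj a (by simpa using ha) b (by simpa using hb))
      simp only [List.foldl_cons, if_true]
      rw [hIH]
      simp
    · have hpx : p ∉ xs := by
        intro hp
        have hle : k p ≤ k x := (List.pairwise_cons.mp hpair).1 x (by simp)
        have hge : k x ≤ k p := (List.pairwise_cons.mp hpair').1 p hp
        exact hx (hinj x (by simp) p (by simp) (le_antisymm hge hle))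
      have hIH := ih x (c + 1) hpair'
        (fun a ha b hb => hinj a (by simp at ha ⊢; tauto) b (by simp at hb ⊢; tauto))
      simp only [List.foldl_cons, if_neg hx]
      rw [hIH]
      have hfilt : (x :: xs).filter (· ≠ p) = x :: xs := by
        rw [List.filter_cons_of_pos (by simpa using hx)]
        rw [List.filter_eq_self.mpr]
        intro a ha
        simp only [ne_eq, decide_eq_true_eq]
        intro h; subst h; exact hpx ha
      rw [hfilt]
      have hxf : (xs.filter (· ≠ x)).toFinset = xs.toFinset.erase x := by
        ext a; simp [and_comm]
      have : (x :: xs).toFinset.card = (xs.filter (· ≠ x)).toFinset.card + 1 := by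
        rw [hxf, List.toFinset_cons]
        rw [← Finset.erase_insert_eq_erase, Finset.card_erase_add_one (Finset.mem_insert_self x _)]
      rw [this]
      push_cast
      ring

-- number of distinct elements of a list, as the length of its first-occurrence set
theorem pvSet_card (xs : List (Int × Int × Int)) :
    ((PySem.Set.ofList xs).length : Int) = (xs.toFinset.card : Int) := by
  have hnd := PySem.Set.nodup_ofList xs
  have : (PySem.Set.ofList xs).toFinset = xs.toFinset := by
    ext a; simp [PySem.Set.mem_ofList]
  rw [← List.toFinset_card_of_nodup hnd, this]

theorem pvPerm_toFinset {l₁ l₂ : List (Int × Int × Int)} (h : l₁.Perm l₂) :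
    l₁.toFinset = l₂.toFinset := by
  ext a; simp [h.mem_iff]

-- ===== VERDICT (by name: the statement is the Claim_ definition above) =====
theorem merge_similar_colors_spec : Claim_equal_merge_similar_colors := by
  intro pixels t hdom hpre
  unfold Spec_merge_similar_colors merge_similar_colors merge_similar_colors_alt
  by_cases hnil : pixels = []
  · simp [hnil]
  · have ht : t ≠ 0 := by
      rcases hpre with h | h
      · exact h
      · exact (hnil h).elim
    simp only [if_neg hnil]
    set qs := pixels.map (pvQuant t) with hqs
    -- A's side: size of the dict = number of distinct quantized colors
    have hA : ((pixels.foldl (fun d pixel =>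
        d.insert (pvQuant t pixel) (d.getD (pvQuant t pixel) 0 + 1))
        (PySem.Dict.empty : PySem.Dict (Int × Int × Int) Int)).size : Int)
        = (qs.toFinset.card : Int) := by
      have hkeys := PySem.Dict.keys_foldl_insert_key (ν := Int) pixels (pvQuant t)
        (fun d x => d.getD (pvQuant t x) 0 + 1) PySem.Dict.empty
      have hsize : ∀ d : PySem.Dict (Int × Int × Int) Int, d.size = d.keys.length := by
        intro d; simp [PySem.Dict.size, PySem.Dict.keys]
      rw [hsize, hkeys]
      have : PySem.Set.update (PySem.Dict.empty (κ := Int × Int × Int) (ν := Int)).keys qs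
          = PySem.Set.ofList qs := rfl
      rw [this, pvSet_card]
    rw [hA]
    -- B's side
    have hperm : (PySem.List.sorted qs pvPackKey).Perm qs := PySem.List.sorted_perm qs pvPackKey false
    have hbnd : ∀ a ∈ PySem.List.sorted qs pvPackKey, pvBnd a := by
      intro a ha
      have : a ∈ qs := hperm.mem_iff.mp ha
      simp only [hqs, List.mem_map] at this
      obtain ⟨p, hp, rfl⟩ := this
      simp only [Dom_merge_similar_colors, Bool.and_eq_true, List.all_eq_true, pvDomInt,
        decide_eq_true_eq] at hdom
      obtain ⟨hpix, htb⟩ := hdom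
      have hpb := hpix p hp
      refine pvQuant_bnd t ht p ?_ ?_ ?_ ?_ <;> rw [abs_le] <;> omega
    have hinj : ∀ a ∈ PySem.List.sorted qs pvPackKey, ∀ b ∈ PySem.List.sorted qs pvPackKey,
        pvPackKey a = pvPackKey b → a = b := by
      intro a ha b hb h; exact pvPackKey_inj a b (hbnd a ha) (hbnd b hb) h
    have hpair := PySem.List.sorted_pairwise qs pvPackKey
    match hmatch : PySem.List.sorted qs pvPackKey with
    | [] =>
      exfalso
      rw [hmatch] at hperm
      have hq : qs = [] := hperm.symm.eq_nil
      exact hnil (List.map_eq_nil_iff.mp (hqs ▸ hq))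
    | q0 :: rest =>
      rw [hmatch] at hpair hinj hperm
      have hscan := pvScan_aux pvPackKey rest q0 1 hpair hinj
      simp only [hscan]
      have hcard : (rest.filter (· ≠ q0)).toFinset.card + 1 = (q0 :: rest).toFinset.card := by
        have hxf : (rest.filter (· ≠ q0)).toFinset = rest.toFinset.erase q0 := by
          ext a; simp [and_comm]
        rw [hxf, List.toFinset_cons, ← Finset.erase_insert_eq_erase,
          Finset.card_erase_add_one (Finset.mem_insert_self q0 _)]
      have hfin : (q0 :: rest).toFinset = qs.toFinset := pvPerm_toFinset hperm
      rw [← hfin, ← hcard]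
      push_cast
      ring
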